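-- pv_equiv track=rewrite | github.com/pennzht/saphira | parser.py | code_to_tokens
-- ===== SOURCE A (Python) =====
-- def code_to_tokens (code):
--     tokens = []
--     token = ''
--     for ch in '\n' + code + '\n':
--         if ch in [' ', '\t', '\n']:
--             if token != '':
--                 tokens.append(token)
--                 token = ''
--         elif ch in ['[', ']']:
--             if token != '':
--                 tokens.append(token)
--             tokens.append(ch)
--             token = ''
--         else:
--             token += ch
--     return tokens
-- ===== SOURCE B (Python) =====
-- def code_to_tokens(code):
--     tokens = []
--     i, n = 0, len(code)
--     while i < n:
--         c = code[i]
--         if c in ' \t\n':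
--             i += 1
--         elif c in '[]':
--             tokens.append(c)
--             i += 1
--         else:
--             j = i + 1
--             while j < n and code[j] not in ' \t\n[]':
--                 j += 1
--             tokens.append(code[i:j])
--             i = j
--     return tokens
-- ===== Notes on version B (the rewrite author's own statement) =====
-- stated objective: faster
-- what changed: Replaces A's char-by-char accumulator state machine (with sentinel newlines padded around the input) with a span-based index scan that emits each word as one slice via maximal munch, keeping no pending-token state.
import Mathlib
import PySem

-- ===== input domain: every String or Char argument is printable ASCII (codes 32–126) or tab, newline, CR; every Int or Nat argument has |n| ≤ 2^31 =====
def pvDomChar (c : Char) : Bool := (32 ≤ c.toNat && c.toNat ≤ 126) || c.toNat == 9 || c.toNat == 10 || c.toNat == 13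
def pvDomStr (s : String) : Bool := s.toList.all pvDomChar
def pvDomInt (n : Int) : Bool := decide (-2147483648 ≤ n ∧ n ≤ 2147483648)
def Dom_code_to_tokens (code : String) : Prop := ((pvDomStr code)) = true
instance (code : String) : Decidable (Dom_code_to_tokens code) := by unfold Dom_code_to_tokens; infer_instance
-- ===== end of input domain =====

-- B is an alternative tokenizer: a span-based scan emitting whole words by maximal munch, instead
-- of A's char-by-char accumulator state machine over a newline-padded copy of the input.

-- ===== PORT A =====
-- state: (tokens, token); one step of A's for-loop body
def pvStepA (st : List String × List Char) (ch : Char) : List String × List Char :=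
  if ch = ' ' ∨ ch = '\t' ∨ ch = '\n' then
    if st.2 ≠ [] then (st.1 ++ [String.ofList st.2], []) else (st.1, [])
  else if ch = '[' ∨ ch = ']' then
    ((if st.2 ≠ [] then st.1 ++ [String.ofList st.2] else st.1) ++ [String.ofList [ch]], [])
  else (st.1, st.2 ++ [ch])

def code_to_tokens (code : String) : List String :=
  (((['\n'] ++ code.toList ++ ['\n']).foldl pvStepA ([], []))).1

-- ===== PORT B =====
-- word character: not space/tab/newline and not a bracket
def pvWordChar (c : Char) : Bool :=
  !(c == ' ' || c == '\t' || c == '\n' || c == '[' || c == ']')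

def pvTokB : List Char → List String
  | [] => []
  | c :: cs =>
    if c = ' ' ∨ c = '\t' ∨ c = '\n' then pvTokB cs
    else if c = '[' ∨ c = ']' then String.ofList [c] :: pvTokB cs
    else String.ofList (c :: cs.takeWhile pvWordChar) :: pvTokB (cs.dropWhile pvWordChar)
termination_by cs => cs.length
decreasing_by
  · simp
  · simp
  · exact Nat.lt_succ_of_le (cs.length_dropWhile_le _)

def code_to_tokens_alt (code : String) : List String := pvTokB code.toList

-- ===== PRECONDITION & SPEC =====
def Spec_code_to_tokens (code : String) (out : List String) : Prop := out = code_to_tokens_alt code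
instance (code : String) (out : List String) : Decidable (Spec_code_to_tokens code out) := by unfold Spec_code_to_tokens; infer_instance

-- ===== CLAIM (what is proved, stated in full; the proofs are below) =====
def Claim_equal_code_to_tokens : Prop := ∀ (code : String), Dom_code_to_tokens code → Spec_code_to_tokens code (code_to_tokens code)

-- ===== LEMMAS AND PROOFS =====

-- reference emitter: A's state machine written as structural recursion on the remaining input,
-- with the trailing-newline flush folded into the base case
def pvEmit (t : List Char) : List Char → List String
  | [] => if t = [] then [] else [String.ofList t]
  | c :: cs =>
    if c = ' ' ∨ c = '\t' ∨ c = '\n' then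
      (if t = [] then [] else [String.ofList t]) ++ pvEmit [] cs
    else if c = '[' ∨ c = ']' then
      (if t = [] then [] else [String.ofList t]) ++ String.ofList [c] :: pvEmit [] cs
    else pvEmit (t ++ [c]) cs

theorem foldl_stepA_emit (cs : List Char) : ∀ (acc : List String) (t : List Char),
    ((cs ++ ['\n']).foldl pvStepA (acc, t)).1 = acc ++ pvEmit t cs := by
  induction cs with
  | nil =>
    intro acc t
    by_cases h : t = [] <;> simp [pvStepA, pvEmit, h]
  | cons c cs ih =>
    intro acc t
    rw [List.cons_append, List.foldl_cons]
    by_cases hw : c = ' ' ∨ c = '\t' ∨ c = '\n'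
    · by_cases h : t = []
      · have hst : pvStepA (acc, t) c = (acc, []) := by simp [pvStepA, hw, h]
        rw [hst, ih]; simp [pvEmit, hw, h]
      · have hst : pvStepA (acc, t) c = (acc ++ [String.ofList t], []) := by simp [pvStepA, hw, h]
        rw [hst, ih]; simp [pvEmit, hw, h]
    · by_cases hb : c = '[' ∨ c = ']'
      · by_cases h : t = []
        · have hst : pvStepA (acc, t) c = (acc ++ [String.ofList [c]], []) := by
            simp [pvStepA, hw, hb, h]
          rw [hst, ih]; simp [pvEmit, hw, hb, h]
        · have hst : pvStepA (acc, t) c = (acc ++ [String.ofList t, String.ofList [c]], []) := by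
            simp [pvStepA, hw, hb, h]
          rw [hst, ih]; simp [pvEmit, hw, hb, h]
      · have hst : pvStepA (acc, t) c = (acc, t ++ [c]) := by simp [pvStepA, hw, hb]
        rw [hst, ih]; simp [pvEmit, hw, hb]

theorem emit_word (cs : List Char) : ∀ (t : List Char), t ≠ [] →
    pvEmit t cs = String.ofList (t ++ cs.takeWhile pvWordChar) :: pvEmit [] (cs.dropWhile pvWordChar) := by
  induction cs with
  | nil => intro t ht; simp [pvEmit, ht]
  | cons c cs ih =>
    intro t ht
    by_cases hw : c = ' ' ∨ c = '\t' ∨ c = '\n'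
    · have hp : pvWordChar c = false := by
        rcases hw with h | h | h <;> simp [pvWordChar, h]
      simp [pvEmit, hw, ht, hp]
    · by_cases hb : c = '[' ∨ c = ']'
      · have hp : pvWordChar c = false := by
          rcases hb with h | h <;> simp [pvWordChar, h]
        simp [pvEmit, hw, hb, ht, hp]
      · have hp : pvWordChar c = true := by
          simp only [pvWordChar, Bool.not_eq_true', Bool.or_eq_false_iff,
            beq_eq_false_iff_ne, ne_eq]
          tauto
        have : t ++ [c] ≠ [] := by simp
        simp [pvEmit, hw, hb, ih _ this, hp]

theorem emit_nil_eq_tokB (cs : List Char) : pvEmit [] cs = pvTokB cs := by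
  induction cs using pvTokB.induct with
  | case1 => simp [pvEmit, pvTokB]
  | case2 c cs hw ih => simp [pvEmit, pvTokB, hw, ih]
  | case3 c cs hw hb ih => simp [pvEmit, pvTokB, hw, hb, ih]
  | case4 c cs hw hb ih =>
    rw [pvEmit, pvTokB]
    simp only [hw, hb, if_false]
    have hne : ([] : List Char) ++ [c] ≠ [] := by simp
    rw [emit_word _ _ hne, ih]
    simp

-- ===== VERDICT (by name: the statement is the Claim_ definition above) =====
theorem code_to_tokens_spec : Claim_equal_code_to_tokens := by
  intro code _
  show _ = _
  unfold code_to_tokens code_to_tokens_alt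
  have h1 : (['\n'] ++ code.toList ++ ['\n']) = '\n' :: (code.toList ++ ['\n']) := by simp
  rw [h1, List.foldl_cons]
  have h2 : pvStepA ([], []) '\n' = ([], []) := by simp [pvStepA]
  rw [h2, foldl_stepA_emit, emit_nil_eq_tokB]
  simp
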